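-- pv_equiv track=rewrite | github.com/kabutohui/ChineseCodingInterviewByPython | 面试题11 数值的整数次方.py | PowerWithUnsignedExponent
-- ===== SOURCE A (Python) =====
-- def PowerWithUnsignedExponent(base, exponent):
--     if exponent == 0:
--         return 0
--     if exponent == 1:
--         return base
--
--     result = PowerWithUnsignedExponent(base, exponent >> 1)
--     result *= result
--     if exponent & 1 == 1:
--         result *= base
--
--     return result
-- ===== SOURCE B (Python) =====
-- def PowerWithUnsignedExponent(base, exponent):
--     if exponent == 0:
--         return 0
--     result = 1
--     factor = base
--     while exponent > 0:
--         if exponent & 1: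
--             result *= factor
--         factor *= factor
--         exponent >>= 1
--     return result
-- ===== Notes on version B (the rewrite author's own statement) =====
-- stated objective: alternative
-- what changed: Replaces the recursive square-and-multiply (square the half-exponent result, then conditionally multiply by base) with an iterative binary-exponentiation loop that maintains an accumulator and a repeatedly squared factor, keeping the module's exponent==0 -> 0 convention.
import Mathlib
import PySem

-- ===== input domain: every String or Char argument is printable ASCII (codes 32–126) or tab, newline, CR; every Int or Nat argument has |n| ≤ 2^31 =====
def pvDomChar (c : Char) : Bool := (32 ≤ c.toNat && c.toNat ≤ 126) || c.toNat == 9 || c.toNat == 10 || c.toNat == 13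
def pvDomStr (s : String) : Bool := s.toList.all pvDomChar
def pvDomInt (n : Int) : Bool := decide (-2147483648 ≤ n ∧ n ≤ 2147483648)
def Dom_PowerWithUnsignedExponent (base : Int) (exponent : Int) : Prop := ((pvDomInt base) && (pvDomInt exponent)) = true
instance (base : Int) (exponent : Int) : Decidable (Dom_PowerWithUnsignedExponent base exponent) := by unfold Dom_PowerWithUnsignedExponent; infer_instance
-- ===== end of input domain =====

-- B replaces A's recursive square-and-multiply with an iterative binary-exponentiation loop
-- (accumulator + repeatedly squared factor); alternative decomposition, same O(log n) multiplications.


-- ===== PORT A =====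
-- literal transliteration of A's recursion; the fuel argument only makes the recursion total
-- (exponent.toNat strictly decreases, so inside Pre_ the fuel is never exhausted; on negative
-- exponents Python A recurses forever and raises RecursionError — excluded by Pre_).
def pvAGo : Nat → Int → Int → Int
  | 0, _, _ => 0
  | fuel+1, base, exponent =>
    if exponent = 0 then 0
    else if exponent = 1 then base
    else
      let result := pvAGo fuel base (exponent >>> (1:Nat))
      let result2 := result * result
      if PySem.Int.band exponent 1 = 1 then result2 * base else result2

def PowerWithUnsignedExponent (base : Int) (exponent : Int) : Int :=
  pvAGo (exponent.toNat + 1) base exponent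

-- ===== PORT B =====
-- the while-loop of Source B as a tail recursion over (factor, exponent, result); same fuel guard.
def pvLoopGo : Nat → Int → Int → Int → Int
  | 0, _, _, result => result
  | fuel+1, factor, exponent, result =>
    if 0 < exponent then
      pvLoopGo fuel (factor * factor) (exponent >>> (1:Nat))
        (if PySem.Int.band exponent 1 ≠ 0 then result * factor else result)
    else result

def PowerWithUnsignedExponent_alt (base : Int) (exponent : Int) : Int :=
  if exponent = 0 then 0
  else pvLoopGo (exponent.toNat + 1) base exponent 1

-- ===== PRECONDITION & SPEC =====
-- Pre_ excludes negative exponents: there Python A recurses forever (exponent >> 1 stays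
-- negative) and raises RecursionError, so A returns no value.
def Pre_PowerWithUnsignedExponent (base : Int) (exponent : Int) : Prop := 0 ≤ exponent
instance (base : Int) (exponent : Int) : Decidable (Pre_PowerWithUnsignedExponent base exponent) := by unfold Pre_PowerWithUnsignedExponent; infer_instance
def pvWitness_PowerWithUnsignedExponent : Int × Int := (3, 5)

def Spec_PowerWithUnsignedExponent (base : Int) (exponent : Int) (out : Int) : Prop := out = PowerWithUnsignedExponent_alt base exponent
instance (base : Int) (exponent : Int) (out : Int) : Decidable (Spec_PowerWithUnsignedExponent base exponent out) := by unfold Spec_PowerWithUnsignedExponent; infer_instance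

-- ===== CLAIM (what is proved, stated in full; the proofs are below) =====
def Claim_equal_PowerWithUnsignedExponent : Prop := ∀ (base : Int) (exponent : Int), Dom_PowerWithUnsignedExponent base exponent → Pre_PowerWithUnsignedExponent base exponent → Spec_PowerWithUnsignedExponent base exponent (PowerWithUnsignedExponent base exponent)

-- ===== LEMMAS AND PROOFS =====

theorem pvShift_natCast (n : Nat) : ((n:Int) >>> (1:Nat)) = ((n >>> 1 : Nat) : Int) := by
  exact_mod_cast rfl

theorem pvBand_natCast (n : Nat) : PySem.Int.band (n:Int) 1 = ((n % 2 : Nat) : Int) := by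
  rw [PySem.Int.band_one]; exact_mod_cast PySem.Int.mod_natCast n 2

-- A computes base ^ exponent for positive exponents (with enough fuel).
theorem pvA_eq_pow (b : Int) : ∀ (fuel n : Nat), 0 < n → n < fuel → pvAGo fuel b (n:Int) = b ^ n := by
  intro fuel
  induction fuel with
  | zero => intro n _ hf; omega
  | succ fuel ih =>
    intro n hn hf
    rw [pvAGo]
    rcases Nat.lt_or_ge n 2 with h2 | h2
    · have h1 : n = 1 := by omega
      subst h1
      norm_num
    · have hne0 : ((n:Int)) ≠ 0 := by omega
      have hne1 : ((n:Int)) ≠ 1 := by omega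
      rw [if_neg hne0, if_neg hne1]
      rw [pvShift_natCast, pvBand_natCast]
      rw [ih (n >>> 1) (by simp [Nat.shiftRight_eq_div_pow]; omega)
            (by simp [Nat.shiftRight_eq_div_pow]; omega)]
      simp only [Nat.shiftRight_eq_div_pow, pow_one]
      rcases Nat.even_or_odd n with he | ho
      · have hm : n % 2 = 0 := Nat.even_iff.mp he
        have hc : ((n % 2 : Nat) : Int) ≠ 1 := by rw [hm]; decide
        rw [if_neg hc, ← pow_add]
        congr 1
        omega
      · have hm : n % 2 = 1 := Nat.odd_iff.mp ho
        have hc : ((n % 2 : Nat) : Int) = 1 := by rw [hm]; rfl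
        rw [if_pos hc, ← pow_add, ← pow_succ]
        congr 1
        omega

-- Loop invariant for B: with enough fuel the loop returns result * factor ^ exponent.
theorem pvLoop_eq_pow : ∀ (fuel n : Nat) (f r : Int), n < fuel → pvLoopGo fuel f (n:Int) r = r * f ^ n := by
  intro fuel
  induction fuel with
  | zero => intro n _ _ hf; omega
  | succ fuel ih =>
    intro n f r hf
    rw [pvLoopGo]
    rcases Nat.eq_zero_or_pos n with h0 | hpos
    · subst h0; norm_num
    · have hlt : (0:Int) < (n:Int) := by exact_mod_cast hpos
      rw [if_pos hlt]
      rw [pvShift_natCast, pvBand_natCast]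
      rw [ih (n >>> 1) _ _ (by simp [Nat.shiftRight_eq_div_pow]; omega)]
      simp only [Nat.shiftRight_eq_div_pow, pow_one]
      rcases Nat.even_or_odd n with he | ho
      · have hm : n % 2 = 0 := Nat.even_iff.mp he
        have hc : ¬ (((n % 2 : Nat) : Int) ≠ 0) := by rw [hm]; decide
        rw [if_neg hc, mul_pow, ← pow_add]
        have hsum : n / 2 + n / 2 = n := by omega
        rw [hsum]
      · have hm : n % 2 = 1 := Nat.odd_iff.mp ho
        have hc : (((n % 2 : Nat) : Int) ≠ 0) := by rw [hm]; decide
        rw [if_pos hc, mul_pow, ← pow_add, mul_assoc, ← pow_succ']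
        have hsum : n / 2 + n / 2 + 1 = n := by omega
        rw [hsum]

-- ===== VERDICT (by name: the statement is the Claim_ definition above) =====
theorem PowerWithUnsignedExponent_spec : Claim_equal_PowerWithUnsignedExponent := by
  intro base exponent _ hpre
  unfold Spec_PowerWithUnsignedExponent PowerWithUnsignedExponent_alt PowerWithUnsignedExponent
  obtain ⟨n, rfl⟩ := Int.eq_ofNat_of_zero_le hpre
  rw [Int.toNat_natCast]
  rcases Nat.eq_zero_or_pos n with h0 | hpos
  · subst h0
    rw [pvAGo]
    norm_num
  · have hne0 : ((n:Int)) ≠ 0 := by omega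
    rw [if_neg hne0]
    rw [pvA_eq_pow base (n+1) n hpos (by omega), pvLoop_eq_pow (n+1) n base 1 (by omega), one_mul]
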